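-- pv_equiv track=rewrite | github.com/pypi-data/pypi-mirror-402 | packages/batem/batem-0.3.1-py3-none-any.whl/batem/core/data.py | normalize_zone_variable_name
-- ===== SOURCE A (Python) =====
-- def normalize_zone_variable_name(name: str) -> str:
--     """Normalize zone-related variable names to ensure colon after prefix.
--
--     Converts patterns like TZoutdoor to TZ:outdoor, PZroom to PZ:room, etc.
--
--     :param name: the variable name to normalize
--     :type name: str
--     :return: normalized variable name
--     :rtype: str
--     """
--     # List of known zone variable prefixes
--     prefixes = ['TZ', 'PZ', 'CZ', 'CCO2', 'PCO2', 'GAIN', 'SETPOINT', 'MODE', 'PHVAC']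
--
--     for prefix in prefixes:
--         # Check if name starts with prefix followed by a letter (not underscore or colon)
--         if name.startswith(prefix) and len(name) > len(prefix):
--             next_char = name[len(prefix)]
--             # Check if there's not already a colon or underscore after the prefix
--             if next_char not in (':', '_'):
--                 # Insert colon after prefix
--                 return prefix + ':' + name[len(prefix):]
--             # If there's an underscore, replace it with a colon
--             elif next_char == '_':
--                 return prefix + ':' + name[len(prefix)+1:]
--
--     return name
-- ===== SOURCE B (Python) =====
-- # B: single left-to-right character walk over a prefix trie instead of testing
-- # each known prefix with startswith; one pass, at most one rewrite.
--
-- def _build_trie():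
--     trie = {}
--     for p in ('TZ', 'PZ', 'CZ', 'CCO2', 'PCO2', 'GAIN', 'SETPOINT', 'MODE', 'PHVAC'):
--         node = trie
--         for ch in p[:-1]:
--             node = node.setdefault(ch, {})
--         node[p[-1]] = None  # terminal: no known prefix extends another
--     return trie
--
--
-- _TRIE = _build_trie()
--
--
-- def normalize_zone_variable_name(name: str) -> str:
--     node = _TRIE
--     for k, ch in enumerate(name):
--         if ch not in node:
--             return name
--         node = node[ch]
--         if node is None:
--             # a full prefix ends at index k; rewrite unless at end or already ':'
--             rest = name[k + 1:]
--             if not rest or rest[0] == ':':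
--                 return name
--             return name[:k + 1] + ':' + (rest[1:] if rest[0] == '_' else rest)
--     return name
-- ===== Notes on version B (the rewrite author's own statement) =====
-- stated objective: alternative
-- what changed: Replaces A's loop that tests each of the 9 known prefixes with startswith by a single left-to-right walk of a character trie built from the prefixes (correct because no known prefix is a prefix of another, so at most one can match).
import Mathlib
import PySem

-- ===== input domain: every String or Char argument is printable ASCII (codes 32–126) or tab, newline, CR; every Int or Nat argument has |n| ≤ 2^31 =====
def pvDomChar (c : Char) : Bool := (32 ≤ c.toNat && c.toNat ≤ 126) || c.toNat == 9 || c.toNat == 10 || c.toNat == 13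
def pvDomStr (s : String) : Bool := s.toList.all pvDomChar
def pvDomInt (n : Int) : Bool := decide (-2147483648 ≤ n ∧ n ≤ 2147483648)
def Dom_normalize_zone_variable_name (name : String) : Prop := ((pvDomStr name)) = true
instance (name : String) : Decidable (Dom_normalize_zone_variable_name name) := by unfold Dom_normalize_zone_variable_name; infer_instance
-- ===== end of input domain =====

-- B replaces A's per-prefix startswith loop by a single left-to-right walk of a
-- prefix trie (objective: alternative algorithm, same observable behaviour).

-- ===== PORT A =====
-- A: loop over the 9 prefixes; startswith + length guard, then a three-way
-- branch on the character after the prefix.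
def nzPrefixes : List (List Char) :=
  [['T','Z'], ['P','Z'], ['C','Z'], ['C','C','O','2'], ['P','C','O','2'],
   ['G','A','I','N'], ['S','E','T','P','O','I','N','T'], ['M','O','D','E'],
   ['P','H','V','A','C']]

def nzLoopA : List (List Char) → List Char → List Char
  | [], l => l
  | p :: ps, l =>
    if PySem.Chars.startswith l p = true ∧ l.length > p.length then
      match PySem.List.pyGet? l ((p.length : Nat) : Int) with
      | some c =>
        if c ≠ ':' ∧ c ≠ '_' then p ++ ':' :: PySem.List.slice l (some ((p.length : Nat) : Int)) none
        else if c = '_' then p ++ ':' :: PySem.List.slice l (some ((p.length + 1 : Nat) : Int)) none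
        else nzLoopA ps l
      | none => l  -- unreachable: the guard ensures index p.length is in range
    else nzLoopA ps l

def normalize_zone_variable_name (name : String) : String :=
  String.ofList (nzLoopA nzPrefixes name.toList)

-- ===== PORT B =====
-- B: one character-by-character walk of a prefix trie (dict-of-dicts in Source B;
-- a mutual inductive here, since a nested inductive is not allowed).
mutual
inductive NzTrie where
  | term : NzTrie
  | node : NzChildren → NzTrie
inductive NzChildren where
  | nil : NzChildren
  | cons : Char → NzTrie → NzChildren → NzChildren
end

-- chain 'c1 → c2 → … → term', the shape setdefault builds for a fresh branch
def nzChain : List Char → NzTrie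
  | [] => .term
  | c :: cs => .node (.cons c (nzChain cs) .nil)

-- the trie _TRIE of Source B, children in Python dict insertion order
def nzTrie : NzChildren :=
  .cons 'T' (nzChain ['Z'])
  (.cons 'P' (.node (.cons 'Z' .term (.cons 'C' (nzChain ['O','2']) (.cons 'H' (nzChain ['V','A','C']) .nil))))
  (.cons 'C' (.node (.cons 'Z' .term (.cons 'C' (nzChain ['O','2']) .nil)))
  (.cons 'G' (nzChain ['A','I','N'])
  (.cons 'S' (nzChain ['E','T','P','O','I','N','T'])
  (.cons 'M' (nzChain ['O','D','E']) .nil)))))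

-- 'ch in node' / 'node[ch]' of Source B
def nzGet : NzChildren → Char → Option NzTrie
  | .nil, _ => none
  | .cons c t rest, ch => if ch = c then some t else nzGet rest ch

-- the enumerate loop of Source B: orig = name, k the current index
def nzWalk (orig : List Char) : List Char → Nat → NzChildren → List Char
  | [], _, _ => orig
  | ch :: tl, k, cs =>
    match nzGet cs ch with
    | none => orig
    | some NzTrie.term =>
      let rest := PySem.List.slice orig (some ((k + 1 : Nat) : Int)) none
      if rest = [] ∨ PySem.List.pyGet? rest 0 = some ':' then orig
      else PySem.List.slice orig none (some ((k + 1 : Nat) : Int)) ++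
           ':' :: (if PySem.List.pyGet? rest 0 = some '_' then PySem.List.slice rest (some 1) none else rest)
    | some (NzTrie.node cs') => nzWalk orig tl (k + 1) cs'

def normalize_zone_variable_name_alt (name : String) : String :=
  String.ofList (nzWalk name.toList name.toList 0 nzTrie)

-- ===== PRECONDITION & SPEC =====
def Spec_normalize_zone_variable_name (name : String) (out : String) : Prop := out = normalize_zone_variable_name_alt name
instance (name : String) (out : String) : Decidable (Spec_normalize_zone_variable_name name out) := by unfold Spec_normalize_zone_variable_name; infer_instance

-- ===== CLAIM =====
def Claim_equal_normalize_zone_variable_name : Prop := ∀ (name : String), Dom_normalize_zone_variable_name name → Spec_normalize_zone_variable_name name (normalize_zone_variable_name name)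

-- ===== LEMMAS AND PROOFS =====
theorem nz_le2 (n : Nat) : (2:Int) ≤ (n:Int) + 1 + 1 := by omega
theorem nz_le4 (n : Nat) : (4:Int) ≤ (n:Int) + 1 + 1 + 1 + 1 := by omega
theorem nz_le5 (n : Nat) : (5:Int) ≤ (n:Int) + 1 + 1 + 1 + 1 + 1 := by omega
theorem nz_le8 (n : Nat) : (8:Int) ≤ (n:Int) + 1 + 1 + 1 + 1 + 1 + 1 + 1 + 1 := by omega

theorem nz_case_TZ (r : List Char) :
    nzLoopA nzPrefixes ('T'::'Z'::r) = nzWalk ('T'::'Z'::r) ('T'::'Z'::r) 0 nzTrie := by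
  rcases r with _ | ⟨h, t⟩
  · decide
  by_cases h1 : h = ':'
  · subst h1
    simp [nzLoopA, nzPrefixes, nzWalk, nzGet, nzTrie, nzChain,
      PySem.Chars.startswith_iff, List.cons_prefix_cons,
      PySem.List.slice, PySem.List.pyGet?, PySem.List.pyIdx?, PySem.List.clampIdx,
      nz_le2, nz_le4, nz_le5, nz_le8]
  by_cases h2 : h = '_'
  · subst h2
    simp [nzLoopA, nzPrefixes, nzWalk, nzGet, nzTrie, nzChain,
      PySem.Chars.startswith_iff, List.cons_prefix_cons,
      PySem.List.slice, PySem.List.pyGet?, PySem.List.pyIdx?, PySem.List.clampIdx,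
      nz_le2, nz_le4, nz_le5, nz_le8]
  · simp [nzLoopA, nzPrefixes, nzWalk, nzGet, nzTrie, nzChain,
      PySem.Chars.startswith_iff, List.cons_prefix_cons,
      PySem.List.slice, PySem.List.pyGet?, PySem.List.pyIdx?, PySem.List.clampIdx,
      nz_le2, nz_le4, nz_le5, nz_le8, h1, h2]

theorem nz_case_PZ (r : List Char) :
    nzLoopA nzPrefixes ('P'::'Z'::r) = nzWalk ('P'::'Z'::r) ('P'::'Z'::r) 0 nzTrie := by
  rcases r with _ | ⟨h, t⟩
  · decide
  by_cases h1 : h = ':'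
  · subst h1
    simp [nzLoopA, nzPrefixes, nzWalk, nzGet, nzTrie, nzChain,
      PySem.Chars.startswith_iff, List.cons_prefix_cons,
      PySem.List.slice, PySem.List.pyGet?, PySem.List.pyIdx?, PySem.List.clampIdx,
      nz_le2, nz_le4, nz_le5, nz_le8]
  by_cases h2 : h = '_'
  · subst h2
    simp [nzLoopA, nzPrefixes, nzWalk, nzGet, nzTrie, nzChain,
      PySem.Chars.startswith_iff, List.cons_prefix_cons,
      PySem.List.slice, PySem.List.pyGet?, PySem.List.pyIdx?, PySem.List.clampIdx,
      nz_le2, nz_le4, nz_le5, nz_le8]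
  · simp [nzLoopA, nzPrefixes, nzWalk, nzGet, nzTrie, nzChain,
      PySem.Chars.startswith_iff, List.cons_prefix_cons,
      PySem.List.slice, PySem.List.pyGet?, PySem.List.pyIdx?, PySem.List.clampIdx,
      nz_le2, nz_le4, nz_le5, nz_le8, h1, h2]

theorem nz_case_CZ (r : List Char) :
    nzLoopA nzPrefixes ('C'::'Z'::r) = nzWalk ('C'::'Z'::r) ('C'::'Z'::r) 0 nzTrie := by
  rcases r with _ | ⟨h, t⟩
  · decide
  by_cases h1 : h = ':'
  · subst h1
    simp [nzLoopA, nzPrefixes, nzWalk, nzGet, nzTrie, nzChain,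
      PySem.Chars.startswith_iff, List.cons_prefix_cons,
      PySem.List.slice, PySem.List.pyGet?, PySem.List.pyIdx?, PySem.List.clampIdx,
      nz_le2, nz_le4, nz_le5, nz_le8]
  by_cases h2 : h = '_'
  · subst h2
    simp [nzLoopA, nzPrefixes, nzWalk, nzGet, nzTrie, nzChain,
      PySem.Chars.startswith_iff, List.cons_prefix_cons,
      PySem.List.slice, PySem.List.pyGet?, PySem.List.pyIdx?, PySem.List.clampIdx,
      nz_le2, nz_le4, nz_le5, nz_le8]
  · simp [nzLoopA, nzPrefixes, nzWalk, nzGet, nzTrie, nzChain,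
      PySem.Chars.startswith_iff, List.cons_prefix_cons,
      PySem.List.slice, PySem.List.pyGet?, PySem.List.pyIdx?, PySem.List.clampIdx,
      nz_le2, nz_le4, nz_le5, nz_le8, h1, h2]

theorem nz_case_CCO2 (r : List Char) :
    nzLoopA nzPrefixes ('C'::'C'::'O'::'2'::r) = nzWalk ('C'::'C'::'O'::'2'::r) ('C'::'C'::'O'::'2'::r) 0 nzTrie := by
  rcases r with _ | ⟨h, t⟩
  · decide
  by_cases h1 : h = ':'
  · subst h1
    simp [nzLoopA, nzPrefixes, nzWalk, nzGet, nzTrie, nzChain,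
      PySem.Chars.startswith_iff, List.cons_prefix_cons,
      PySem.List.slice, PySem.List.pyGet?, PySem.List.pyIdx?, PySem.List.clampIdx,
      nz_le2, nz_le4, nz_le5, nz_le8]
  by_cases h2 : h = '_'
  · subst h2
    simp [nzLoopA, nzPrefixes, nzWalk, nzGet, nzTrie, nzChain,
      PySem.Chars.startswith_iff, List.cons_prefix_cons,
      PySem.List.slice, PySem.List.pyGet?, PySem.List.pyIdx?, PySem.List.clampIdx,
      nz_le2, nz_le4, nz_le5, nz_le8]
  · simp [nzLoopA, nzPrefixes, nzWalk, nzGet, nzTrie, nzChain,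
      PySem.Chars.startswith_iff, List.cons_prefix_cons,
      PySem.List.slice, PySem.List.pyGet?, PySem.List.pyIdx?, PySem.List.clampIdx,
      nz_le2, nz_le4, nz_le5, nz_le8, h1, h2]

theorem nz_case_PCO2 (r : List Char) :
    nzLoopA nzPrefixes ('P'::'C'::'O'::'2'::r) = nzWalk ('P'::'C'::'O'::'2'::r) ('P'::'C'::'O'::'2'::r) 0 nzTrie := by
  rcases r with _ | ⟨h, t⟩
  · decide
  by_cases h1 : h = ':'
  · subst h1
    simp [nzLoopA, nzPrefixes, nzWalk, nzGet, nzTrie, nzChain,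
      PySem.Chars.startswith_iff, List.cons_prefix_cons,
      PySem.List.slice, PySem.List.pyGet?, PySem.List.pyIdx?, PySem.List.clampIdx,
      nz_le2, nz_le4, nz_le5, nz_le8]
  by_cases h2 : h = '_'
  · subst h2
    simp [nzLoopA, nzPrefixes, nzWalk, nzGet, nzTrie, nzChain,
      PySem.Chars.startswith_iff, List.cons_prefix_cons,
      PySem.List.slice, PySem.List.pyGet?, PySem.List.pyIdx?, PySem.List.clampIdx,
      nz_le2, nz_le4, nz_le5, nz_le8]
  · simp [nzLoopA, nzPrefixes, nzWalk, nzGet, nzTrie, nzChain,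
      PySem.Chars.startswith_iff, List.cons_prefix_cons,
      PySem.List.slice, PySem.List.pyGet?, PySem.List.pyIdx?, PySem.List.clampIdx,
      nz_le2, nz_le4, nz_le5, nz_le8, h1, h2]

theorem nz_case_GAIN (r : List Char) :
    nzLoopA nzPrefixes ('G'::'A'::'I'::'N'::r) = nzWalk ('G'::'A'::'I'::'N'::r) ('G'::'A'::'I'::'N'::r) 0 nzTrie := by
  rcases r with _ | ⟨h, t⟩
  · decide
  by_cases h1 : h = ':'
  · subst h1
    simp [nzLoopA, nzPrefixes, nzWalk, nzGet, nzTrie, nzChain,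
      PySem.Chars.startswith_iff, List.cons_prefix_cons,
      PySem.List.slice, PySem.List.pyGet?, PySem.List.pyIdx?, PySem.List.clampIdx,
      nz_le2, nz_le4, nz_le5, nz_le8]
  by_cases h2 : h = '_'
  · subst h2
    simp [nzLoopA, nzPrefixes, nzWalk, nzGet, nzTrie, nzChain,
      PySem.Chars.startswith_iff, List.cons_prefix_cons,
      PySem.List.slice, PySem.List.pyGet?, PySem.List.pyIdx?, PySem.List.clampIdx,
      nz_le2, nz_le4, nz_le5, nz_le8]
  · simp [nzLoopA, nzPrefixes, nzWalk, nzGet, nzTrie, nzChain,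
      PySem.Chars.startswith_iff, List.cons_prefix_cons,
      PySem.List.slice, PySem.List.pyGet?, PySem.List.pyIdx?, PySem.List.clampIdx,
      nz_le2, nz_le4, nz_le5, nz_le8, h1, h2]

theorem nz_case_SETPOINT (r : List Char) :
    nzLoopA nzPrefixes ('S'::'E'::'T'::'P'::'O'::'I'::'N'::'T'::r) = nzWalk ('S'::'E'::'T'::'P'::'O'::'I'::'N'::'T'::r) ('S'::'E'::'T'::'P'::'O'::'I'::'N'::'T'::r) 0 nzTrie := by
  rcases r with _ | ⟨h, t⟩
  · decide
  by_cases h1 : h = ':'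
  · subst h1
    simp [nzLoopA, nzPrefixes, nzWalk, nzGet, nzTrie, nzChain,
      PySem.Chars.startswith_iff, List.cons_prefix_cons,
      PySem.List.slice, PySem.List.pyGet?, PySem.List.pyIdx?, PySem.List.clampIdx,
      nz_le2, nz_le4, nz_le5, nz_le8]
  by_cases h2 : h = '_'
  · subst h2
    simp [nzLoopA, nzPrefixes, nzWalk, nzGet, nzTrie, nzChain,
      PySem.Chars.startswith_iff, List.cons_prefix_cons,
      PySem.List.slice, PySem.List.pyGet?, PySem.List.pyIdx?, PySem.List.clampIdx,
      nz_le2, nz_le4, nz_le5, nz_le8]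
  · simp [nzLoopA, nzPrefixes, nzWalk, nzGet, nzTrie, nzChain,
      PySem.Chars.startswith_iff, List.cons_prefix_cons,
      PySem.List.slice, PySem.List.pyGet?, PySem.List.pyIdx?, PySem.List.clampIdx,
      nz_le2, nz_le4, nz_le5, nz_le8, h1, h2]

theorem nz_case_MODE (r : List Char) :
    nzLoopA nzPrefixes ('M'::'O'::'D'::'E'::r) = nzWalk ('M'::'O'::'D'::'E'::r) ('M'::'O'::'D'::'E'::r) 0 nzTrie := by
  rcases r with _ | ⟨h, t⟩
  · decide
  by_cases h1 : h = ':'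
  · subst h1
    simp [nzLoopA, nzPrefixes, nzWalk, nzGet, nzTrie, nzChain,
      PySem.Chars.startswith_iff, List.cons_prefix_cons,
      PySem.List.slice, PySem.List.pyGet?, PySem.List.pyIdx?, PySem.List.clampIdx,
      nz_le2, nz_le4, nz_le5, nz_le8]
  by_cases h2 : h = '_'
  · subst h2
    simp [nzLoopA, nzPrefixes, nzWalk, nzGet, nzTrie, nzChain,
      PySem.Chars.startswith_iff, List.cons_prefix_cons,
      PySem.List.slice, PySem.List.pyGet?, PySem.List.pyIdx?, PySem.List.clampIdx,
      nz_le2, nz_le4, nz_le5, nz_le8]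
  · simp [nzLoopA, nzPrefixes, nzWalk, nzGet, nzTrie, nzChain,
      PySem.Chars.startswith_iff, List.cons_prefix_cons,
      PySem.List.slice, PySem.List.pyGet?, PySem.List.pyIdx?, PySem.List.clampIdx,
      nz_le2, nz_le4, nz_le5, nz_le8, h1, h2]

theorem nz_case_PHVAC (r : List Char) :
    nzLoopA nzPrefixes ('P'::'H'::'V'::'A'::'C'::r) = nzWalk ('P'::'H'::'V'::'A'::'C'::r) ('P'::'H'::'V'::'A'::'C'::r) 0 nzTrie := by
  rcases r with _ | ⟨h, t⟩
  · decide
  by_cases h1 : h = ':'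
  · subst h1
    simp [nzLoopA, nzPrefixes, nzWalk, nzGet, nzTrie, nzChain,
      PySem.Chars.startswith_iff, List.cons_prefix_cons,
      PySem.List.slice, PySem.List.pyGet?, PySem.List.pyIdx?, PySem.List.clampIdx,
      nz_le2, nz_le4, nz_le5, nz_le8]
  by_cases h2 : h = '_'
  · subst h2
    simp [nzLoopA, nzPrefixes, nzWalk, nzGet, nzTrie, nzChain,
      PySem.Chars.startswith_iff, List.cons_prefix_cons,
      PySem.List.slice, PySem.List.pyGet?, PySem.List.pyIdx?, PySem.List.clampIdx,
      nz_le2, nz_le4, nz_le5, nz_le8]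
  · simp [nzLoopA, nzPrefixes, nzWalk, nzGet, nzTrie, nzChain,
      PySem.Chars.startswith_iff, List.cons_prefix_cons,
      PySem.List.slice, PySem.List.pyGet?, PySem.List.pyIdx?, PySem.List.clampIdx,
      nz_le2, nz_le4, nz_le5, nz_le8, h1, h2]

theorem nz_main (l : List Char) : nzLoopA nzPrefixes l = nzWalk l l 0 nzTrie := by
  rcases l with _ | ⟨c0, l⟩
  · decide
  by_cases h0_T : c0 = 'T'
  · subst h0_T
    rcases l with _ | ⟨c1, l⟩
    · decide
    by_cases h1_Z : c1 = 'Z'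
    · subst h1_Z
      exact nz_case_TZ l
    · simp [nzLoopA, nzPrefixes, nzWalk, nzGet, nzTrie, nzChain,
      PySem.Chars.startswith_iff, List.cons_prefix_cons,
      PySem.List.slice, PySem.List.pyGet?, PySem.List.pyIdx?, PySem.List.clampIdx,
      nz_le2, nz_le4, nz_le5, nz_le8, h1_Z, Ne.symm h1_Z]
  by_cases h0_P : c0 = 'P'
  · subst h0_P
    rcases l with _ | ⟨c1, l⟩
    · decide
    by_cases h1_Z : c1 = 'Z'
    · subst h1_Z
      exact nz_case_PZ l
    by_cases h1_C : c1 = 'C'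
    · subst h1_C
      rcases l with _ | ⟨c2, l⟩
      · decide
      by_cases h2_O : c2 = 'O'
      · subst h2_O
        rcases l with _ | ⟨c3, l⟩
        · decide
        by_cases h3_2 : c3 = '2'
        · subst h3_2
          exact nz_case_PCO2 l
        · simp [nzLoopA, nzPrefixes, nzWalk, nzGet, nzTrie, nzChain,
      PySem.Chars.startswith_iff, List.cons_prefix_cons,
      PySem.List.slice, PySem.List.pyGet?, PySem.List.pyIdx?, PySem.List.clampIdx,
      nz_le2, nz_le4, nz_le5, nz_le8, h3_2, Ne.symm h3_2]
      · simp [nzLoopA, nzPrefixes, nzWalk, nzGet, nzTrie, nzChain,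
      PySem.Chars.startswith_iff, List.cons_prefix_cons,
      PySem.List.slice, PySem.List.pyGet?, PySem.List.pyIdx?, PySem.List.clampIdx,
      nz_le2, nz_le4, nz_le5, nz_le8, h2_O, Ne.symm h2_O]
    by_cases h1_H : c1 = 'H'
    · subst h1_H
      rcases l with _ | ⟨c2, l⟩
      · decide
      by_cases h2_V : c2 = 'V'
      · subst h2_V
        rcases l with _ | ⟨c3, l⟩
        · decide
        by_cases h3_A : c3 = 'A'
        · subst h3_A
          rcases l with _ | ⟨c4, l⟩
          · decide
          by_cases h4_C : c4 = 'C'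
          · subst h4_C
            exact nz_case_PHVAC l
          · simp [nzLoopA, nzPrefixes, nzWalk, nzGet, nzTrie, nzChain,
      PySem.Chars.startswith_iff, List.cons_prefix_cons,
      PySem.List.slice, PySem.List.pyGet?, PySem.List.pyIdx?, PySem.List.clampIdx,
      nz_le2, nz_le4, nz_le5, nz_le8, h4_C, Ne.symm h4_C]
        · simp [nzLoopA, nzPrefixes, nzWalk, nzGet, nzTrie, nzChain,
      PySem.Chars.startswith_iff, List.cons_prefix_cons,
      PySem.List.slice, PySem.List.pyGet?, PySem.List.pyIdx?, PySem.List.clampIdx,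
      nz_le2, nz_le4, nz_le5, nz_le8, h3_A, Ne.symm h3_A]
      · simp [nzLoopA, nzPrefixes, nzWalk, nzGet, nzTrie, nzChain,
      PySem.Chars.startswith_iff, List.cons_prefix_cons,
      PySem.List.slice, PySem.List.pyGet?, PySem.List.pyIdx?, PySem.List.clampIdx,
      nz_le2, nz_le4, nz_le5, nz_le8, h2_V, Ne.symm h2_V]
    · simp [nzLoopA, nzPrefixes, nzWalk, nzGet, nzTrie, nzChain,
      PySem.Chars.startswith_iff, List.cons_prefix_cons,
      PySem.List.slice, PySem.List.pyGet?, PySem.List.pyIdx?, PySem.List.clampIdx,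
      nz_le2, nz_le4, nz_le5, nz_le8, h1_Z, h1_C, h1_H, Ne.symm h1_Z, Ne.symm h1_C, Ne.symm h1_H]
  by_cases h0_C : c0 = 'C'
  · subst h0_C
    rcases l with _ | ⟨c1, l⟩
    · decide
    by_cases h1_Z : c1 = 'Z'
    · subst h1_Z
      exact nz_case_CZ l
    by_cases h1_C : c1 = 'C'
    · subst h1_C
      rcases l with _ | ⟨c2, l⟩
      · decide
      by_cases h2_O : c2 = 'O'
      · subst h2_O
        rcases l with _ | ⟨c3, l⟩
        · decide
        by_cases h3_2 : c3 = '2'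
        · subst h3_2
          exact nz_case_CCO2 l
        · simp [nzLoopA, nzPrefixes, nzWalk, nzGet, nzTrie, nzChain,
      PySem.Chars.startswith_iff, List.cons_prefix_cons,
      PySem.List.slice, PySem.List.pyGet?, PySem.List.pyIdx?, PySem.List.clampIdx,
      nz_le2, nz_le4, nz_le5, nz_le8, h3_2, Ne.symm h3_2]
      · simp [nzLoopA, nzPrefixes, nzWalk, nzGet, nzTrie, nzChain,
      PySem.Chars.startswith_iff, List.cons_prefix_cons,
      PySem.List.slice, PySem.List.pyGet?, PySem.List.pyIdx?, PySem.List.clampIdx,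
      nz_le2, nz_le4, nz_le5, nz_le8, h2_O, Ne.symm h2_O]
    · simp [nzLoopA, nzPrefixes, nzWalk, nzGet, nzTrie, nzChain,
      PySem.Chars.startswith_iff, List.cons_prefix_cons,
      PySem.List.slice, PySem.List.pyGet?, PySem.List.pyIdx?, PySem.List.clampIdx,
      nz_le2, nz_le4, nz_le5, nz_le8, h1_Z, h1_C, Ne.symm h1_Z, Ne.symm h1_C]
  by_cases h0_G : c0 = 'G'
  · subst h0_G
    rcases l with _ | ⟨c1, l⟩
    · decide
    by_cases h1_A : c1 = 'A'
    · subst h1_A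
      rcases l with _ | ⟨c2, l⟩
      · decide
      by_cases h2_I : c2 = 'I'
      · subst h2_I
        rcases l with _ | ⟨c3, l⟩
        · decide
        by_cases h3_N : c3 = 'N'
        · subst h3_N
          exact nz_case_GAIN l
        · simp [nzLoopA, nzPrefixes, nzWalk, nzGet, nzTrie, nzChain,
      PySem.Chars.startswith_iff, List.cons_prefix_cons,
      PySem.List.slice, PySem.List.pyGet?, PySem.List.pyIdx?, PySem.List.clampIdx,
      nz_le2, nz_le4, nz_le5, nz_le8, h3_N, Ne.symm h3_N]
      · simp [nzLoopA, nzPrefixes, nzWalk, nzGet, nzTrie, nzChain,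
      PySem.Chars.startswith_iff, List.cons_prefix_cons,
      PySem.List.slice, PySem.List.pyGet?, PySem.List.pyIdx?, PySem.List.clampIdx,
      nz_le2, nz_le4, nz_le5, nz_le8, h2_I, Ne.symm h2_I]
    · simp [nzLoopA, nzPrefixes, nzWalk, nzGet, nzTrie, nzChain,
      PySem.Chars.startswith_iff, List.cons_prefix_cons,
      PySem.List.slice, PySem.List.pyGet?, PySem.List.pyIdx?, PySem.List.clampIdx,
      nz_le2, nz_le4, nz_le5, nz_le8, h1_A, Ne.symm h1_A]
  by_cases h0_S : c0 = 'S'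
  · subst h0_S
    rcases l with _ | ⟨c1, l⟩
    · decide
    by_cases h1_E : c1 = 'E'
    · subst h1_E
      rcases l with _ | ⟨c2, l⟩
      · decide
      by_cases h2_T : c2 = 'T'
      · subst h2_T
        rcases l with _ | ⟨c3, l⟩
        · decide
        by_cases h3_P : c3 = 'P'
        · subst h3_P
          rcases l with _ | ⟨c4, l⟩
          · decide
          by_cases h4_O : c4 = 'O'
          · subst h4_O
            rcases l with _ | ⟨c5, l⟩
            · decide
            by_cases h5_I : c5 = 'I'
            · subst h5_I
              rcases l with _ | ⟨c6, l⟩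
              · decide
              by_cases h6_N : c6 = 'N'
              · subst h6_N
                rcases l with _ | ⟨c7, l⟩
                · decide
                by_cases h7_T : c7 = 'T'
                · subst h7_T
                  exact nz_case_SETPOINT l
                · simp [nzLoopA, nzPrefixes, nzWalk, nzGet, nzTrie, nzChain,
      PySem.Chars.startswith_iff, List.cons_prefix_cons,
      PySem.List.slice, PySem.List.pyGet?, PySem.List.pyIdx?, PySem.List.clampIdx,
      nz_le2, nz_le4, nz_le5, nz_le8, h7_T, Ne.symm h7_T]
              · simp [nzLoopA, nzPrefixes, nzWalk, nzGet, nzTrie, nzChain,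
      PySem.Chars.startswith_iff, List.cons_prefix_cons,
      PySem.List.slice, PySem.List.pyGet?, PySem.List.pyIdx?, PySem.List.clampIdx,
      nz_le2, nz_le4, nz_le5, nz_le8, h6_N, Ne.symm h6_N]
            · simp [nzLoopA, nzPrefixes, nzWalk, nzGet, nzTrie, nzChain,
      PySem.Chars.startswith_iff, List.cons_prefix_cons,
      PySem.List.slice, PySem.List.pyGet?, PySem.List.pyIdx?, PySem.List.clampIdx,
      nz_le2, nz_le4, nz_le5, nz_le8, h5_I, Ne.symm h5_I]
          · simp [nzLoopA, nzPrefixes, nzWalk, nzGet, nzTrie, nzChain,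
      PySem.Chars.startswith_iff, List.cons_prefix_cons,
      PySem.List.slice, PySem.List.pyGet?, PySem.List.pyIdx?, PySem.List.clampIdx,
      nz_le2, nz_le4, nz_le5, nz_le8, h4_O, Ne.symm h4_O]
        · simp [nzLoopA, nzPrefixes, nzWalk, nzGet, nzTrie, nzChain,
      PySem.Chars.startswith_iff, List.cons_prefix_cons,
      PySem.List.slice, PySem.List.pyGet?, PySem.List.pyIdx?, PySem.List.clampIdx,
      nz_le2, nz_le4, nz_le5, nz_le8, h3_P, Ne.symm h3_P]
      · simp [nzLoopA, nzPrefixes, nzWalk, nzGet, nzTrie, nzChain,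
      PySem.Chars.startswith_iff, List.cons_prefix_cons,
      PySem.List.slice, PySem.List.pyGet?, PySem.List.pyIdx?, PySem.List.clampIdx,
      nz_le2, nz_le4, nz_le5, nz_le8, h2_T, Ne.symm h2_T]
    · simp [nzLoopA, nzPrefixes, nzWalk, nzGet, nzTrie, nzChain,
      PySem.Chars.startswith_iff, List.cons_prefix_cons,
      PySem.List.slice, PySem.List.pyGet?, PySem.List.pyIdx?, PySem.List.clampIdx,
      nz_le2, nz_le4, nz_le5, nz_le8, h1_E, Ne.symm h1_E]
  by_cases h0_M : c0 = 'M'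
  · subst h0_M
    rcases l with _ | ⟨c1, l⟩
    · decide
    by_cases h1_O : c1 = 'O'
    · subst h1_O
      rcases l with _ | ⟨c2, l⟩
      · decide
      by_cases h2_D : c2 = 'D'
      · subst h2_D
        rcases l with _ | ⟨c3, l⟩
        · decide
        by_cases h3_E : c3 = 'E'
        · subst h3_E
          exact nz_case_MODE l
        · simp [nzLoopA, nzPrefixes, nzWalk, nzGet, nzTrie, nzChain,
      PySem.Chars.startswith_iff, List.cons_prefix_cons,
      PySem.List.slice, PySem.List.pyGet?, PySem.List.pyIdx?, PySem.List.clampIdx,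
      nz_le2, nz_le4, nz_le5, nz_le8, h3_E, Ne.symm h3_E]
      · simp [nzLoopA, nzPrefixes, nzWalk, nzGet, nzTrie, nzChain,
      PySem.Chars.startswith_iff, List.cons_prefix_cons,
      PySem.List.slice, PySem.List.pyGet?, PySem.List.pyIdx?, PySem.List.clampIdx,
      nz_le2, nz_le4, nz_le5, nz_le8, h2_D, Ne.symm h2_D]
    · simp [nzLoopA, nzPrefixes, nzWalk, nzGet, nzTrie, nzChain,
      PySem.Chars.startswith_iff, List.cons_prefix_cons,
      PySem.List.slice, PySem.List.pyGet?, PySem.List.pyIdx?, PySem.List.clampIdx,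
      nz_le2, nz_le4, nz_le5, nz_le8, h1_O, Ne.symm h1_O]
  · simp [nzLoopA, nzPrefixes, nzWalk, nzGet, nzTrie, nzChain,
      PySem.Chars.startswith_iff, List.cons_prefix_cons,
      PySem.List.slice, PySem.List.pyGet?, PySem.List.pyIdx?, PySem.List.clampIdx,
      nz_le2, nz_le4, nz_le5, nz_le8, h0_T, h0_P, h0_C, h0_G, h0_S, h0_M, Ne.symm h0_T, Ne.symm h0_P, Ne.symm h0_C, Ne.symm h0_G, Ne.symm h0_S, Ne.symm h0_M]

-- ===== VERDICT =====
theorem normalize_zone_variable_name_spec : Claim_equal_normalize_zone_variable_name := by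
  intro name _
  unfold Spec_normalize_zone_variable_name normalize_zone_variable_name normalize_zone_variable_name_alt
  rw [nz_main name.toList]
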